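-- pv_equiv track=rewrite | github.com/NexGenMap/dl-semantic-segmentation | src/image_utils.py | get_predict_positions
-- ===== SOURCE A (Python) =====
-- def pad_index(index, dim_size, chip_size, pad_size):
--
-- 	i0 = (index - pad_size)
-- 	i1 = (index + chip_size + pad_size)
--
-- 	if i1 > (dim_size + pad_size):
-- 		i1 = (dim_size + pad_size)
-- 		i0 = i1 - chip_size - 2*pad_size
--
-- 	return i0, i1
--
-- def get_predict_positions(x_size, y_size, chip_size = 388, pad_size = 92, x_offset = 0, y_offset = 0):
--
-- 	x_start = pad_size + x_offset
-- 	x_end = x_size - pad_size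
--
-- 	y_start = pad_size + y_offset
-- 	y_end = y_size - pad_size
--
-- 	input_positions = []
--
-- 	for x0 in range(x_start, x_end, chip_size):
--
-- 		x0_pad, x1_pad = pad_index(x0, x_size, chip_size, pad_size)
--
-- 		for y0 in range(y_start, y_end, chip_size):
--
-- 			y0_pad, y1_pad = pad_index(y0, y_size, chip_size, pad_size)
-- 			input_positions.append([x0_pad, x1_pad, y0_pad, y1_pad])
--
-- 	return input_positions
-- ===== SOURCE B (Python) =====
-- def get_predict_positions(x_size, y_size, chip_size=388, pad_size=92, x_offset=0, y_offset=0):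
--     # closed-form: a padded window always ends at min(start+chip+pad, size+pad) and
--     # spans chip+2*pad; iterate one flat index and decode (row, col) with divmod
--     nx = len(range(pad_size + x_offset, x_size - pad_size, chip_size))
--     ny = len(range(pad_size + y_offset, y_size - pad_size, chip_size))
--     lim_x = x_size + pad_size
--     lim_y = y_size + pad_size
--     span = chip_size + 2 * pad_size
--     out = []
--     for k in range(nx * ny):
--         i, j = divmod(k, ny)
--         x1 = min(pad_size + x_offset + i * chip_size + chip_size + pad_size, lim_x)
--         y1 = min(pad_size + y_offset + j * chip_size + chip_size + pad_size, lim_y)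
--         out.append([x1 - span, x1, y1 - span, y1])
--     return out
-- ===== Notes on version B (the rewrite author's own statement) =====
-- stated objective: alternative
-- what changed: B removes the pad_index helper and the nested loops entirely: it derives a closed form (a padded window always ends at min(start+chip+pad, size+pad) and spans chip+2*pad), counts the chips per axis arithmetically, and emits all positions in one flat loop over a single index decoded with divmod.
import Mathlib
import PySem

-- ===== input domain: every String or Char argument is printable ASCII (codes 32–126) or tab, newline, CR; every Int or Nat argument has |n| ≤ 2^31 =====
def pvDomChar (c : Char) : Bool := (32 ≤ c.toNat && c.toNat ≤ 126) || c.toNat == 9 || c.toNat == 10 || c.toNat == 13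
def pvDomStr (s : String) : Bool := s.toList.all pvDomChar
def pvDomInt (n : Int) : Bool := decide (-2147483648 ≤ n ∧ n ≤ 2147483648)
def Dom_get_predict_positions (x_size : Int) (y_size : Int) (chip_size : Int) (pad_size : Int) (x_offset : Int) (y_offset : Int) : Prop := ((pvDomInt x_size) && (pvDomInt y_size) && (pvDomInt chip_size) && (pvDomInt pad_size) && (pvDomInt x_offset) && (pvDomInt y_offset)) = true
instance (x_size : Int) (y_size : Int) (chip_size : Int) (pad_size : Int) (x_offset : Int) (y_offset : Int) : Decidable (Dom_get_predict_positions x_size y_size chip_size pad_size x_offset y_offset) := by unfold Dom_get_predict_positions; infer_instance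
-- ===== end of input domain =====

-- B drops the pad_index helper and the nested loops: a closed form for the padded window
-- (it always ends at min(start+chip+pad, size+pad) and spans chip+2*pad) plus one flat
-- loop over a single index decoded with divmod.

-- ===== PORT A =====
-- module helper pad_index, used by A
def padIndex (index : Int) (dim_size : Int) (chip_size : Int) (pad_size : Int) : Int × Int :=
  let i0 := index - pad_size
  let i1 := index + chip_size + pad_size
  if i1 > dim_size + pad_size then
    let i1 := dim_size + pad_size
    let i0 := i1 - chip_size - 2 * pad_size
    (i0, i1)
  else
    (i0, i1)

def get_predict_positions (x_size : Int) (y_size : Int) (chip_size : Int) (pad_size : Int) (x_offset : Int) (y_offset : Int) : List (List Int) :=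
  let x_start := pad_size + x_offset
  let x_end := x_size - pad_size
  let y_start := pad_size + y_offset
  let y_end := y_size - pad_size
  (PySem.List.pyRange x_start x_end chip_size).foldl (fun acc x0 =>
    let xp := padIndex x0 x_size chip_size pad_size
    (PySem.List.pyRange y_start y_end chip_size).foldl (fun acc2 y0 =>
      let yp := padIndex y0 y_size chip_size pad_size
      acc2 ++ [[xp.1, xp.2, yp.1, yp.2]]) acc) []

-- ===== PORT B =====
def get_predict_positions_alt (x_size : Int) (y_size : Int) (chip_size : Int) (pad_size : Int) (x_offset : Int) (y_offset : Int) : List (List Int) :=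
  let nx : Int := (PySem.List.pyRange (pad_size + x_offset) (x_size - pad_size) chip_size).length
  let ny : Int := (PySem.List.pyRange (pad_size + y_offset) (y_size - pad_size) chip_size).length
  let lim_x := x_size + pad_size
  let lim_y := y_size + pad_size
  let span := chip_size + 2 * pad_size
  (PySem.List.pyRange 0 (nx * ny) 1).map (fun k =>
    let i := PySem.Int.floordiv k ny
    let j := PySem.Int.mod k ny
    let x1 := min (pad_size + x_offset + i * chip_size + chip_size + pad_size) lim_x
    let y1 := min (pad_size + y_offset + j * chip_size + chip_size + pad_size) lim_y
    [x1 - span, x1, y1 - span, y1])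

-- ===== PRECONDITION & SPEC =====
-- Pre_ excludes only chip_size = 0, on which A's range() raises ValueError.
def Pre_get_predict_positions (x_size : Int) (y_size : Int) (chip_size : Int) (pad_size : Int) (x_offset : Int) (y_offset : Int) : Prop := chip_size ≠ 0
instance (x_size : Int) (y_size : Int) (chip_size : Int) (pad_size : Int) (x_offset : Int) (y_offset : Int) : Decidable (Pre_get_predict_positions x_size y_size chip_size pad_size x_offset y_offset) := by unfold Pre_get_predict_positions; infer_instance
def pvWitness_get_predict_positions : Int × Int × Int × Int × Int × Int := (1000, 800, 388, 92, 0, 0)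

def Spec_get_predict_positions (x_size : Int) (y_size : Int) (chip_size : Int) (pad_size : Int) (x_offset : Int) (y_offset : Int) (out : List (List Int)) : Prop := out = get_predict_positions_alt x_size y_size chip_size pad_size x_offset y_offset
instance (x_size : Int) (y_size : Int) (chip_size : Int) (pad_size : Int) (x_offset : Int) (y_offset : Int) (out : List (List Int)) : Decidable (Spec_get_predict_positions x_size y_size chip_size pad_size x_offset y_offset out) := by unfold Spec_get_predict_positions; infer_instance

-- ===== CLAIM =====
def Claim_equal_get_predict_positions : Prop := ∀ (x_size : Int) (y_size : Int) (chip_size : Int) (pad_size : Int) (x_offset : Int) (y_offset : Int), Dom_get_predict_positions x_size y_size chip_size pad_size x_offset y_offset → Pre_get_predict_positions x_size y_size chip_size pad_size x_offset y_offset → Spec_get_predict_positions x_size y_size chip_size pad_size x_offset y_offset (get_predict_positions x_size y_size chip_size pad_size x_offset y_offset)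

-- ===== LEMMAS AND PROOFS =====

-- pad_index in closed form: the window ends at min(index+chip+pad, dim+pad) and
-- always spans chip_size + 2*pad_size.
theorem padIndex_closed (index dim_size chip_size pad_size : Int) :
    padIndex index dim_size chip_size pad_size =
      (min (index + chip_size + pad_size) (dim_size + pad_size) - chip_size - 2 * pad_size,
       min (index + chip_size + pad_size) (dim_size + pad_size)) := by
  unfold padIndex
  dsimp only
  split
  · next h => rw [min_eq_right (by omega)]
  · next h => rw [min_eq_left (by omega)]; exact Prod.ext (by ring) rfl

-- a flat loop over range (m*n) with divmod decoding equals the nested loops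
theorem range_mul_flatMap {α : Type} (g : Nat → Nat → α) (m n : Nat) :
    (List.range (m * n)).map (fun k => g (k / n) (k % n)) =
      (List.range m).flatMap (fun i => (List.range n).map (fun j => g i j)) := by
  induction m with
  | zero => simp
  | succ m ih =>
    rw [Nat.succ_mul, List.range_add, List.map_append, ih, List.range_succ,
      List.flatMap_append]
    congr 1
    simp only [List.flatMap_cons, List.flatMap_nil, List.append_nil, List.map_map]
    apply List.map_congr_left
    intro j hj
    rw [List.mem_range] at hj
    have hn : 0 < n := by omega
    simp only [Function.comp]
    rw [show m * n + j = n * m + j by ring, Nat.mul_add_div hn, Nat.mul_add_mod,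
      Nat.div_eq_of_lt hj, Nat.mod_eq_of_lt hj, Nat.add_zero]

theorem pyRange_eq_map_range (a b s : Int) :
    PySem.List.pyRange a b s =
      (List.range (PySem.List.pyRange a b s).length).map (fun k : Nat => a + s * (k : Int)) := by
  unfold PySem.List.pyRange
  split
  · simp
  · dsimp only
    conv_rhs => rw [List.length_map, List.length_range]

-- ===== VERDICT =====
theorem get_predict_positions_spec : Claim_equal_get_predict_positions := by
  intro x_size y_size chip_size pad_size x_offset y_offset _ _
  unfold Spec_get_predict_positions get_predict_positions get_predict_positions_alt
  simp only [PySem.List.foldl_append_singleton_eq_map, PySem.List.foldl_append_eq_flatMap,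
    List.nil_append]
  conv_lhs => rw [pyRange_eq_map_range (pad_size + x_offset) (x_size - pad_size) chip_size,
    pyRange_eq_map_range (pad_size + y_offset) (y_size - pad_size) chip_size]
  generalize (PySem.List.pyRange (pad_size + x_offset) (x_size - pad_size) chip_size).length = m
  generalize (PySem.List.pyRange (pad_size + y_offset) (y_size - pad_size) chip_size).length = n
  rw [show ((m : Int) * (n : Int)) = ((m * n : Nat) : Int) by push_cast; ring,
    PySem.List.pyRange_one, Int.sub_zero, Int.toNat_natCast]
  simp only [List.flatMap_map, List.map_map, Function.comp_def]
  refine Eq.trans (range_mul_flatMap _ m n).symm ?_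
  apply List.map_congr_left
  intro k hk
  rw [List.mem_range] at hk
  have hn : 0 < n := by
    rcases Nat.eq_zero_or_pos n with h | h
    · subst h; simp at hk
    · exact h
  simp only [Function.comp_def, padIndex_closed, Int.zero_add,
    PySem.Int.floordiv_natCast, PySem.Int.mod_natCast]
  ring_nf
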